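-- pv_equiv track=rewrite | github.com/janfiszer/fl-varying-normalization | results_analysis/st/generate_table.py | sort_by_substring_order
-- ===== SOURCE A (Python) =====
-- def sort_by_substring_order(main_list, order_list):
--     # Create a key function to determine the sort order
--     def sort_key(string):
--         for index, substring in enumerate(order_list):
--             if substring in string:
--                 return index
--         return len(order_list)  # Put items without a match at the end
--
--     # Sort the main list using the key function
--     sorted_list = sorted(main_list, key=sort_key)
--     return sorted_list
-- ===== SOURCE B (Python) =====
-- def sort_by_substring_order(main_list, order_list):
--     def group_index(string):
--         for index, substring in enumerate(order_list):
--             if substring in string: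
--                 return index
--         return len(order_list)
--
--     # Distribute into one bucket per order index (plus one for no match),
--     # preserving input order, then concatenate the buckets.
--     buckets = [[] for _ in range(len(order_list) + 1)]
--     for string in main_list:
--         buckets[group_index(string)].append(string)
--     result = []
--     for bucket in buckets:
--         result.extend(bucket)
--     return result
-- ===== Notes on version B (the rewrite author's own statement) =====
-- stated objective: alternative
-- what changed: Replaces the key-based comparison sort with a single-pass stable bucket distribution: each string is appended to the bucket of its first matching order index (extra last bucket for no match) and the buckets are concatenated.
import Mathlib
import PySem

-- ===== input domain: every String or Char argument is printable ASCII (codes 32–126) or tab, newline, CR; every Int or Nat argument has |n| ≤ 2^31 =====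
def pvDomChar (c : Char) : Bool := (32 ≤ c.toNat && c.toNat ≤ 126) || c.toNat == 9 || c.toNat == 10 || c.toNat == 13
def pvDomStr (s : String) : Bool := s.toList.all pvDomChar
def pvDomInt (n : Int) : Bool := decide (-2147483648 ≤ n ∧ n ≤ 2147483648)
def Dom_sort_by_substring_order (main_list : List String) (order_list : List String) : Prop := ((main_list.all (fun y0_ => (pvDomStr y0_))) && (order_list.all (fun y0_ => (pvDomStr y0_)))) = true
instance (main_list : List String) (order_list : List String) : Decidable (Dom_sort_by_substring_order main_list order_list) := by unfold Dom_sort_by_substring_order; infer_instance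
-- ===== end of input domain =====

-- B replaces A's key-based stable comparison sort by a one-pass stable bucket distribution
-- (one bucket per order index plus a final no-match bucket), same return value.

-- ===== PORT A =====
-- sort_key: first index of a substring of `string` in order_list, else len(order_list)
def pvSortKey : List String → String → Nat
  | [], _ => 0
  | substring :: rest, string =>
      if PySem.Str.isIn substring string then 0 else pvSortKey rest string + 1

def sort_by_substring_order (main_list : List String) (order_list : List String) : List String :=
  PySem.List.sorted main_list (pvSortKey order_list)

-- ===== PORT B =====
-- group_index: same helper as in Source B (first matching order index, else len(order_list))
def pvGroupIndex : List String → String → Nat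
  | [], _ => 0
  | substring :: rest, string =>
      if PySem.Str.isIn substring string then 0 else pvGroupIndex rest string + 1

def sort_by_substring_order_alt (main_list : List String) (order_list : List String) : List String :=
  let buckets0 : List (List String) := (List.range (order_list.length + 1)).map (fun _ => [])
  let buckets := main_list.foldl
    (fun bs string => bs.modify (pvGroupIndex order_list string) (fun b => b ++ [string])) buckets0
  buckets.foldl (fun acc bucket => acc ++ bucket) []

-- ===== PRECONDITION & SPEC =====
def Spec_sort_by_substring_order (main_list : List String) (order_list : List String) (out : List String) : Prop := out = sort_by_substring_order_alt main_list order_list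
instance (main_list : List String) (order_list : List String) (out : List String) : Decidable (Spec_sort_by_substring_order main_list order_list out) := by unfold Spec_sort_by_substring_order; infer_instance

-- ===== CLAIM (what is proved, stated in full; the proofs are below) =====
def Claim_equal_sort_by_substring_order : Prop := ∀ (main_list : List String) (order_list : List String), Dom_sort_by_substring_order main_list order_list → Spec_sort_by_substring_order main_list order_list (sort_by_substring_order main_list order_list)

-- ===== LEMMAS AND PROOFS =====

theorem pvSortKey_eq_groupIndex (o : List String) (s : String) :
    pvSortKey o s = pvGroupIndex o s := by
  induction o with
  | nil => rfl
  | cons a t ih => simp [pvSortKey, pvGroupIndex, ih]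

theorem pvGroupIndex_le (o : List String) (s : String) :
    pvGroupIndex o s ≤ o.length := by
  induction o with
  | nil => simp [pvGroupIndex]
  | cons a t ih =>
      simp only [pvGroupIndex, List.length_cons]
      split
      · omega
      · omega

theorem insertBy_append_of_not_before {α : Type} (before : α → α → Bool) (x : α)
    (ys zs : List α) (h : ∀ y ∈ ys, before x y = false) :
    PySem.List.insertBy before x (ys ++ zs) = ys ++ PySem.List.insertBy before x zs := by
  induction ys with
  | nil => simp
  | cons y ys ih =>
      have hy : before x y = false := h y (List.mem_cons_self)
      simp only [List.cons_append, PySem.List.insertBy, hy]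
      simp only [Bool.false_eq_true, if_false]
      rw [ih (fun y hy' => h y (List.mem_cons_of_mem _ hy'))]

theorem insertBy_of_forall_before {α : Type} (before : α → α → Bool) (x : α)
    (zs : List α) (h : ∀ z ∈ zs, before x z = true) :
    PySem.List.insertBy before x zs = x :: zs := by
  cases zs with
  | nil => rfl
  | cons z zs => simp [PySem.List.insertBy, h z (List.mem_cons_self)]

-- inserting x into concatenated key-buckets appends it to its own bucket
theorem insertBy_flatMap_buckets {α : Type} (key : α → Nat) (x : α)
    (is : List Nat) (cs : List α) (hp : is.Pairwise (· < ·)) (hmem : key x ∈ is) :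
    PySem.List.insertBy (fun a b => decide (key a < key b)) x
        (is.flatMap (fun i => cs.filter (fun y => key y == i)))
      = is.flatMap (fun i => (cs ++ [x]).filter (fun y => key y == i)) := by
  induction is with
  | nil => simp at hmem
  | cons i is ih =>
      rcases List.pairwise_cons.mp hp with ⟨hlt, hp'⟩
      simp only [List.flatMap_cons]
      by_cases hx : key x = i
      · have h1 : ∀ y ∈ cs.filter (fun y => key y == i),
            (decide (key x < key y)) = false := by
          intro y hy
          have := (List.mem_filter.mp hy).2
          have : key y = i := by simpa using this
          simp [this, hx]
        have h2 : ∀ z ∈ is.flatMap (fun i => cs.filter (fun y => key y == i)),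
            (decide (key x < key z)) = true := by
          intro z hz
          rcases List.mem_flatMap.mp hz with ⟨j, hj, hzj⟩
          have hzk : key z = j := by simpa using (List.mem_filter.mp hzj).2
          have : i < j := hlt j hj
          simp [hzk, hx]
          omega
        rw [insertBy_append_of_not_before _ _ _ _ h1,
            insertBy_of_forall_before _ _ _ h2]
        have hbi : (cs ++ [x]).filter (fun y => key y == i)
            = cs.filter (fun y => key y == i) ++ [x] := by
          simp [List.filter_append, List.filter, hx]
        have hrest : is.flatMap (fun i => (cs ++ [x]).filter (fun y => key y == i))
            = is.flatMap (fun i => cs.filter (fun y => key y == i)) := by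
          apply List.flatMap_congr
          intro j hj
          have hne : (key x == j) = false := by
            have := hlt j hj; simp; omega
          simp [List.filter_append, List.filter, hne]
        rw [hbi, hrest]
        simp
      · have hmem' : key x ∈ is := by
          rcases List.mem_cons.mp hmem with h | h
          · exact absurd h hx
          · exact h
        have h1 : ∀ y ∈ cs.filter (fun y => key y == i),
            (decide (key x < key y)) = false := by
          intro y hy
          have hyk : key y = i := by simpa using (List.mem_filter.mp hy).2
          have : i < key x := hlt _ hmem'
          simp [hyk]
          omega
        rw [insertBy_append_of_not_before _ _ _ _ h1, ih hp' hmem']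
        have hbi : (cs ++ [x]).filter (fun y => key y == i)
            = cs.filter (fun y => key y == i) := by
          have hb : (key x == i) = false := by simp [hx]
          simp [List.filter_append, List.filter, hb]
        rw [hbi]

-- a stable sort on Nat keys is the concatenation of the key-filters in key order
theorem sorted_eq_flatMap_filter {α : Type} (key : α → Nat) (N : Nat) (xs : List α)
    (h : ∀ x ∈ xs, key x ≤ N) :
    PySem.List.sorted xs key
      = (List.range (N + 1)).flatMap (fun i => xs.filter (fun y => key y == i)) := by
  rw [PySem.List.sorted_eq_foldl_insertBy]
  have inv : ∀ (ys cs : List α), (∀ x ∈ ys, key x ≤ N) →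
      ys.foldl (fun acc x => PySem.List.insertBy (fun a b => decide (key a < key b)) x acc)
        ((List.range (N + 1)).flatMap (fun i => cs.filter (fun y => key y == i)))
      = (List.range (N + 1)).flatMap (fun i => (cs ++ ys).filter (fun y => key y == i)) := by
    intro ys
    induction ys with
    | nil => intro cs _; simp
    | cons x ys ih =>
        intro cs hys
        simp only [List.foldl_cons]
        rw [insertBy_flatMap_buckets key x _ cs List.pairwise_lt_range
            (List.mem_range.mpr (by have := hys x List.mem_cons_self; omega))]
        rw [ih (cs ++ [x]) (fun z hz => hys z (List.mem_cons_of_mem _ hz))]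
        simp
  have h0 : (List.range (N + 1)).flatMap (fun _ => ([] : List α)) = [] := by simp
  have := inv xs [] h
  simpa [h0] using this

-- the bucket-update step keeps the buckets equal to the key-filters
theorem modify_buckets_eq {α : Type} (key : α → Nat) (N : Nat) (cs : List α) (x : α)
    (_hx : key x ≤ N) :
    ((List.range (N + 1)).map (fun i => cs.filter (fun y => key y == i))).modify
        (key x) (fun b => b ++ [x])
      = (List.range (N + 1)).map (fun i => (cs ++ [x]).filter (fun y => key y == i)) := by
  apply List.ext_getElem
  · simp [List.length_modify]
  · intro j h₁ h₂
    have hjN : j < N + 1 := by simpa [List.length_modify] using h₁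
    rw [List.getElem_modify]
    simp only [List.getElem_map, List.getElem_range]
    by_cases hj : key x = j
    · simp [hj, List.filter_append, List.filter]
    · have hb : (key x == j) = false := by simp [hj]
      simp [hj, List.filter_append, List.filter, hb]

-- ===== VERDICT (by name: the statement is the Claim_ definition above) =====
theorem sort_by_substring_order_spec : Claim_equal_sort_by_substring_order := by
  intro main_list order_list _
  unfold Spec_sort_by_substring_order
  unfold sort_by_substring_order sort_by_substring_order_alt
  set key := pvGroupIndex order_list with hkey
  set N := order_list.length with hN
  have hkeys : (pvSortKey order_list) = key := by
    funext s; exact pvSortKey_eq_groupIndex order_list s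
  rw [hkeys]
  -- buckets invariant for B
  have binv : ∀ (ys cs : List String),
      ys.foldl (fun bs s => bs.modify (key s) (fun b => b ++ [s]))
        ((List.range (N + 1)).map (fun i => cs.filter (fun y => key y == i)))
      = (List.range (N + 1)).map (fun i => (cs ++ ys).filter (fun y => key y == i)) := by
    intro ys
    induction ys with
    | nil => intro cs; simp
    | cons x ys ih =>
        intro cs
        simp only [List.foldl_cons]
        rw [modify_buckets_eq key N cs x (by rw [hkey, hN]; exact pvGroupIndex_le order_list x)]
        rw [ih (cs ++ [x])]
        simp
  have hb0 : ((List.range (N + 1)).map (fun _ => ([] : List String)))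
      = (List.range (N + 1)).map (fun i => ([] : List String).filter (fun y => key y == i)) := by
    simp
  rw [PySem.List.sorted_eq_foldl_insertBy] at *
  rw [← PySem.List.sorted_eq_foldl_insertBy]
  rw [sorted_eq_flatMap_filter key N main_list
      (fun x _ => by rw [hkey, hN]; exact pvGroupIndex_le order_list x)]
  simp only [hb0]
  rw [binv main_list []]
  rw [PySem.List.foldl_append_eq_flatten]
  simp [List.flatMap_def]
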